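-- pv_equiv track=rewrite | github.com/ngarside/server | scripts/src/specifier_to_dockerfile.py | specifier_to_dockerfile
-- ===== SOURCE A (Python) =====
-- def specifier_to_dockerfile(spec: str) -> str:
-- 	parts = spec.split('/')
--
-- 	# Specifier is an empty string.
-- 	if len(parts) == 1 and not parts[0]:
-- 		raise ValueError('Missing specifier')
--
-- 	# Specifier is in the format 'service'.
-- 	elif len(parts) == 1 and parts[0]:
-- 		return f'{parts[0]}/src/{parts[0]}.dockerfile'
--
-- 	# Specifier is in the format 'service/image'.
-- 	elif len(parts) == 2 and all(part for part in parts):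
-- 		return f'{parts[0]}/src/{parts[1]}.dockerfile'
--
-- 	# Specifier is in an unsupported format.
-- 	raise ValueError(f'Invalid specifier <{spec}>')
-- ===== SOURCE B (Python) =====
-- def specifier_to_dockerfile(spec: str) -> str:
-- 	if not spec:
-- 		raise ValueError('Missing specifier')
-- 	svc = []
-- 	img = None
-- 	for ch in spec:
-- 		if ch == '/':
-- 			if img is not None or not svc:
-- 				raise ValueError(f'Invalid specifier <{spec}>')
-- 			img = []
-- 		elif img is None:
-- 			svc.append(ch)
-- 		else:
-- 			img.append(ch)
-- 	if img is not None and not img: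
-- 		raise ValueError(f'Invalid specifier <{spec}>')
-- 	svc_s = ''.join(svc)
-- 	name = ''.join(img) if img is not None else svc_s
-- 	return svc_s + '/src/' + name + '.dockerfile'
-- ===== Notes on version B (the rewrite author's own statement) =====
-- stated objective: alternative
-- what changed: Replaces split-into-list-and-branch-on-length with a single-pass character state machine that accumulates the service and optional image while scanning, rejecting a second slash or an empty part on the fly.
import Mathlib
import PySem

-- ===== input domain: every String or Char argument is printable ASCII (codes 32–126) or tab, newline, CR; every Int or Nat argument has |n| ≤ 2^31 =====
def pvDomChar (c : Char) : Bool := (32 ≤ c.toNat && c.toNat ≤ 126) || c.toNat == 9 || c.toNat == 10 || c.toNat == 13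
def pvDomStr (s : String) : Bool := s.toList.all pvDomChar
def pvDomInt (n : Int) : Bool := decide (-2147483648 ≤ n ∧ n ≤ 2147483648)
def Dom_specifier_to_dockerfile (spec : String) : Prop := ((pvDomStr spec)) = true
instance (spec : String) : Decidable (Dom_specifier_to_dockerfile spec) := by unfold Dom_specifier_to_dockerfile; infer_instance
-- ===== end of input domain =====

-- B replaces split-into-list-and-branch-on-length with a one-pass character state
-- machine accumulating service/image; equal return values proved on Pre_ (where A returns).

-- ===== PORT A =====
-- literal port: parts = spec.split('/'), then the four branches in order;
-- the two 'raise ValueError' branches (excluded by Pre_) return "".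
def specifier_to_dockerfile (spec : String) : String :=
  let parts := PySem.Chars.splitOn spec.toList "/".toList
  if parts.length = 1 ∧ parts.getD 0 [] = [] then
    "" -- raise ValueError('Missing specifier')
  else if parts.length = 1 ∧ parts.getD 0 [] ≠ [] then
    String.mk (parts.getD 0 [] ++ "/src/".toList ++ parts.getD 0 [] ++ ".dockerfile".toList)
  else if parts.length = 2 ∧ parts.all (fun p => !p.isEmpty) then
    String.mk (parts.getD 0 [] ++ "/src/".toList ++ parts.getD 1 [] ++ ".dockerfile".toList)
  else
    "" -- raise ValueError(f'Invalid specifier <{spec}>')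

-- ===== PORT B =====
-- literal port of Source B's for-loop: one pass over the characters with state
-- (svc, img); 'none' = the loop raised ValueError (excluded by Pre_).
def specBLoop : List Char → List Char → Option (List Char) → Option (List Char × Option (List Char))
  | [], svc, img => some (svc, img)
  | ch :: rest, svc, img =>
    if ch = '/' then
      if img.isSome || svc = [] then none -- raise ValueError(f'Invalid specifier <{spec}>')
      else specBLoop rest svc (some [])
    else match img with
      | none => specBLoop rest (svc ++ [ch]) none
      | some i => specBLoop rest svc (some (i ++ [ch]))

def specifier_to_dockerfile_alt (spec : String) : String :=
  if spec.toList = [] then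
    "" -- raise ValueError('Missing specifier')
  else
    match specBLoop spec.toList [] none with
    | none => "" -- raise ValueError inside the loop
    | some (svc, img) =>
      if img = some [] then
        "" -- raise ValueError(f'Invalid specifier <{spec}>')
      else
        String.mk (svc ++ "/src/".toList ++ img.getD svc ++ ".dockerfile".toList)

-- ===== PRECONDITION & SPEC =====
-- Pre_ = exactly the inputs where A returns: nonempty, at most one '/', and no
-- leading or trailing '/' (otherwise A raises ValueError).
def Pre_specifier_to_dockerfile (spec : String) : Prop :=
  spec.toList ≠ [] ∧ spec.toList.count '/' ≤ 1 ∧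
  spec.toList.head? ≠ some '/' ∧ spec.toList.getLast? ≠ some '/'
instance (spec : String) : Decidable (Pre_specifier_to_dockerfile spec) := by
  unfold Pre_specifier_to_dockerfile; infer_instance

def pvWitness_specifier_to_dockerfile : String := "web/api"

def Spec_specifier_to_dockerfile (spec : String) (out : String) : Prop := out = specifier_to_dockerfile_alt spec
instance (spec : String) (out : String) : Decidable (Spec_specifier_to_dockerfile spec out) := by unfold Spec_specifier_to_dockerfile; infer_instance

-- ===== CLAIM (what is proved, stated in full; the proofs are below) =====
def Claim_equal_specifier_to_dockerfile : Prop := ∀ (spec : String), Dom_specifier_to_dockerfile spec → Pre_specifier_to_dockerfile spec → Spec_specifier_to_dockerfile spec (specifier_to_dockerfile spec)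

-- ===== LEMMAS AND PROOFS =====

theorem go_no_slash (l cur : List Char) (acc : List (List Char)) (fuel : Nat) (hf : l.length < fuel)
    (h : '/' ∉ l) :
    PySem.Chars.splitOn.go ['/'] fuel l cur acc = acc.reverse ++ [cur.reverse ++ l] := by
  induction l generalizing fuel cur with
  | nil =>
      cases fuel with
      | zero => omega
      | succ f => simp [PySem.Chars.splitOn.go]
  | cons c rest ih =>
      cases fuel with
      | zero => simp at hf
      | succ f =>
          have hc : c ≠ '/' := fun hc => h (by simp [hc])
          have hpre : List.isPrefixOf ['/'] (c :: rest) = false := by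
            simp [List.isPrefixOf]
            exact fun hc' => absurd hc'.symm hc
          rw [PySem.Chars.splitOn.go, hpre]
          simp only [Bool.false_eq_true, if_false]
          rw [ih (c :: cur) f (by simpa using hf) (fun hm => h (by simp [hm]))]
          simp

theorem go_one_slash (a b cur : List Char) (acc : List (List Char)) (fuel : Nat)
    (hf : (a ++ '/' :: b).length < fuel) (ha : '/' ∉ a) (hb : '/' ∉ b) :
    PySem.Chars.splitOn.go ['/'] fuel (a ++ '/' :: b) cur acc
      = acc.reverse ++ [cur.reverse ++ a, b] := by
  induction a generalizing fuel cur with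
  | nil =>
      cases fuel with
      | zero => simp at hf
      | succ f =>
          have hpre : List.isPrefixOf ['/'] ('/' :: b) = true := by
            simp [List.isPrefixOf]
          rw [List.nil_append, PySem.Chars.splitOn.go, hpre]
          simp only [if_true, List.length_cons, List.length_nil, List.drop_succ_cons,
            List.drop_zero]
          rw [go_no_slash b [] (cur.reverse :: acc) f (by simpa using hf) hb]
          simp
  | cons c rest ih =>
      cases fuel with
      | zero => simp at hf
      | succ f =>
          have hc : c ≠ '/' := fun hc => ha (by simp [hc])
          have hpre : List.isPrefixOf ['/'] (c :: (rest ++ '/' :: b)) = false := by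
            simp [List.isPrefixOf]
            exact fun hc' => absurd hc'.symm hc
          rw [List.cons_append, PySem.Chars.splitOn.go, hpre]
          simp only [Bool.false_eq_true, if_false]
          rw [ih (c :: cur) f (by simp at hf ⊢; omega) (fun hm => ha (by simp [hm]))]
          simp

theorem splitOn_no_slash (cs : List Char) (h : '/' ∉ cs) :
    PySem.Chars.splitOn cs ['/'] = [cs] := by
  unfold PySem.Chars.splitOn
  rw [go_no_slash cs [] [] (cs.length + 1) (by omega) h]
  simp

theorem splitOn_one_slash (a b : List Char) (ha : '/' ∉ a) (hb : '/' ∉ b) :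
    PySem.Chars.splitOn (a ++ '/' :: b) ['/'] = [a, b] := by
  unfold PySem.Chars.splitOn
  rw [go_one_slash a b [] [] ((a ++ '/' :: b).length + 1) (by omega) ha hb]
  simp

theorem specBLoop_none_no_slash (l svc : List Char) (h : '/' ∉ l) :
    specBLoop l svc none = some (svc ++ l, none) := by
  induction l generalizing svc with
  | nil => simp [specBLoop]
  | cons c rest ih =>
      have hc : c ≠ '/' := fun hc => h (by simp [hc])
      rw [specBLoop, if_neg hc, ih (svc ++ [c]) (fun hm => h (by simp [hm]))]
      simp

theorem specBLoop_some_no_slash (l svc i : List Char) (h : '/' ∉ l) :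
    specBLoop l svc (some i) = some (svc, some (i ++ l)) := by
  induction l generalizing i with
  | nil => simp [specBLoop]
  | cons c rest ih =>
      have hc : c ≠ '/' := fun hc => h (by simp [hc])
      rw [specBLoop, if_neg hc]
      rw [ih (i ++ [c]) (fun hm => h (by simp [hm]))]
      simp

theorem specBLoop_append_none (a t svc : List Char) (ha : '/' ∉ a) :
    specBLoop (a ++ t) svc none = specBLoop t (svc ++ a) none := by
  induction a generalizing svc with
  | nil => simp
  | cons c rest ih =>
      have hc : c ≠ '/' := fun hc => ha (by simp [hc])
      rw [List.cons_append, specBLoop, if_neg hc]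
      rw [ih (svc ++ [c]) (fun hm => ha (by simp [hm]))]
      simp

-- ===== VERDICT (by name: the statement is the Claim_ definition above) =====
theorem specifier_to_dockerfile_spec : Claim_equal_specifier_to_dockerfile := by
  intro spec _ hpre
  obtain ⟨hne, hcnt, hhd, hlast⟩ := hpre
  unfold Spec_specifier_to_dockerfile specifier_to_dockerfile specifier_to_dockerfile_alt
  by_cases hin : '/' ∈ spec.toList
  · obtain ⟨a, b, hcs⟩ := List.append_of_mem hin
    have hcnt' : a.count '/' + (b.count '/' + 1) ≤ 1 := by
      rw [hcs] at hcnt; simpa using hcnt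
    have ha : '/' ∉ a := List.count_eq_zero.mp (by omega : a.count '/' = 0)
    have hb : '/' ∉ b := List.count_eq_zero.mp (by omega : b.count '/' = 0)
    have hane : a ≠ [] := by
      intro h; rw [hcs, h] at hhd; simp at hhd
    have hbne : b ≠ [] := by
      intro h
      rw [hcs, h] at hlast
      rw [List.getLast?_append_cons] at hlast
      simp at hlast
    have hloop : specBLoop (a ++ '/' :: b) [] none = some (a, some b) := by
      rw [specBLoop_append_none a ('/' :: b) [] ha]
      rw [specBLoop, if_pos rfl, if_neg (by simpa using hane)]
      exact specBLoop_some_no_slash b a [] hb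
    rw [hcs]
    simp [show "/".toList = ['/'] from rfl, splitOn_one_slash a b ha hb, hloop,
      hane, hbne, Option.getD]
  · have hsp := splitOn_no_slash spec.toList hin
    have hloop := specBLoop_none_no_slash spec.toList [] hin
    simp [show "/".toList = ['/'] from rfl, hsp, hloop, hne, Option.getD]
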